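-- pv_equiv track=rewrite | github.com/arvind73/codewars | Best Travel/best_travel.py | choose_best_sum2
-- ===== SOURCE A (Python) =====
-- def recurse(sum, ls, level):
--   if level == 1:
--         return [(x+sum) for x in ls]
--   ary = list(ls)
--   totals = []
--   for x in ls:
--     ary.remove(x)
--     if len(ary) >= level - 1:
--       totals += recurse(sum+x, ary, level - 1)
--   return totals
--
-- def choose_best_sum2(t, k, ls):
--     if len(ls) < k:
--       return None
--     totals = recurse(0, ls, k)
--     sum = 0
--     for x in totals:
--       if x > sum and x <= t:
--         sum = x
--     if sum == 0:
--       return None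
--     return sum
-- ===== SOURCE B (Python) =====
-- def choose_best_sum2(t, k, ls):
--     if k < 0 or len(ls) < k:
--         return None
--     # dp[j] = set of sums achievable by choosing exactly j of the distances seen so far
--     dp = [{0}] + [set() for _ in range(k)]
--     for x in ls:
--         shifted = [{s + x for s in prev} for prev in dp[:-1]]
--         dp = [dp[0]] + [cur | sh for cur, sh in zip(dp[1:], shifted)]
--     best = None
--     for s in dp[k]:
--         if 0 < s <= t and (best is None or s > best):
--             best = s
--     return best
-- ===== Notes on version B (the rewrite author's own statement) =====
-- stated objective: alternative
-- what changed: A recursively enumerates every k-selection of the list (materialising all partial sums) and then scans them; B runs a subset-sum dynamic programme keeping, for each count j <= k, the set of distinct sums achievable with exactly j of the items seen so far, then takes the best qualifying sum from the k-row.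
import Mathlib
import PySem

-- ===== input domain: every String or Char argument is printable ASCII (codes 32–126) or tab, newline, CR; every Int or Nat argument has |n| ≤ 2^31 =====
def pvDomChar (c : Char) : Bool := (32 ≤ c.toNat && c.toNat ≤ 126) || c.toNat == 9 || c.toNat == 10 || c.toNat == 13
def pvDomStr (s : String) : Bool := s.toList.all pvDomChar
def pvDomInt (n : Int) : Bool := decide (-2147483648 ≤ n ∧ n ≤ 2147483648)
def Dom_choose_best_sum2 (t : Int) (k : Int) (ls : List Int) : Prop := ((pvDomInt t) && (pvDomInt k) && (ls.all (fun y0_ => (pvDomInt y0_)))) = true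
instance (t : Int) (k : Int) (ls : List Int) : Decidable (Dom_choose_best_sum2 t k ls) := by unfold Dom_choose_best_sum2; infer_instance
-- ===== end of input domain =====

-- B replaces A's recursive enumeration of all k-selections by a subset-sum dynamic programme over
-- sets of achievable sums of exactly j chosen items (objective: alternative algorithm; it collapses
-- duplicate sums, but on inputs whose k-subset sums are all distinct its cost is comparable to A's).

-- ===== PORT A =====
-- 'recurse' of Source A. The loop 'for x in ls: ary.remove(x); …' is the foldl over ls with state
-- (ary, totals).  'ary.remove(x)' is PySem.List.remove?; Python would raise ValueError when
-- x ∉ ary, which is unreachable here (x is always the head of ary), so '.getD st.1' is exact on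
-- every reachable state.  fuel bounds the recursion depth; it is never exhausted since each
-- nested call receives a strictly shorter list (fuel = ls.length + 1 at the top call).
def recurseA : Nat → Int → List Int → Int → List Int
  | 0, _, _, _ => []
  | fuel+1, s, ls, level =>
    if level = 1 then ls.map (fun x => x + s)
    else
      (ls.foldl (fun (st : List Int × List Int) x =>
        let ary := (PySem.List.remove? st.1 x).getD st.1
        if level - 1 ≤ (ary.length : Int) then
          (ary, st.2 ++ recurseA fuel (s + x) ary (level - 1))
        else (ary, st.2)) (ls, ([] : List Int))).2

def choose_best_sum2 (t : Int) (k : Int) (ls : List Int) : Option Int :=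
  if (ls.length : Int) < k then none
  else
    let totals := recurseA (ls.length + 1) 0 ls k
    let s := totals.foldl (fun acc x => if acc < x ∧ x ≤ t then x else acc) 0
    if s = 0 then none else some s

-- ===== PORT B =====
-- '{s + x for s in prev}' of Source B
def bShift (x : Int) (s : PySem.Set Int) : PySem.Set Int :=
  PySem.Set.ofList (s.map (fun v => v + x))

-- one iteration of Source B's 'for x in ls' body: dp = [dp[0]] + [cur | sh for cur, sh in zip(dp[1:], shifted)]
-- (dp is never [] — its length is k+1 ≥ 1 — so the [] branch is unreachable)
def bStep (x : Int) (dp : List (PySem.Set Int)) : List (PySem.Set Int) :=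
  match dp with
  | [] => []
  | d0 :: rest =>
      d0 :: List.zipWith (fun cur sh => PySem.Set.union cur sh) rest (dp.dropLast.map (bShift x))

def choose_best_sum2_alt (t : Int) (k : Int) (ls : List Int) : Option Int :=
  if k < 0 ∨ (ls.length : Int) < k then none
  else
    let dp0 : List (PySem.Set Int) :=
      PySem.Set.ofList [0] :: (PySem.List.pyRange 0 k 1).map (fun _ => PySem.Set.empty)
    let dp := ls.foldl (fun dp x => bStep x dp) dp0
    -- dp[k]: always in range (dp.length = k+1)
    let dpk := (PySem.List.pyGet? dp k).getD PySem.Set.empty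
    dpk.foldl (fun best s =>
      match best with
      | none => if 0 < s ∧ s ≤ t then some s else none
      | some b => if 0 < s ∧ s ≤ t ∧ b < s then some s else some b) none

-- ===== PRECONDITION & SPEC =====
def Spec_choose_best_sum2 (t : Int) (k : Int) (ls : List Int) (out : Option Int) : Prop := out = choose_best_sum2_alt t k ls
instance (t : Int) (k : Int) (ls : List Int) (out : Option Int) : Decidable (Spec_choose_best_sum2 t k ls out) := by unfold Spec_choose_best_sum2; infer_instance

-- ===== CLAIM (what is proved, stated in full; the proofs are below) =====
def Claim_equal_choose_best_sum2 : Prop := ∀ (t : Int) (k : Int) (ls : List Int), Dom_choose_best_sum2 t k ls → Spec_choose_best_sum2 t k ls (choose_best_sum2 t k ls)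

-- ===== LEMMAS AND PROOFS =====

-- the accumulated branches of A's loop over pending suffix l (ary = l is the loop invariant)
def glueA (fuel : Nat) (s level : Int) : List Int → List Int
  | [] => []
  | x :: rest =>
      (if level - 1 ≤ (rest.length : Int) then recurseA fuel (s + x) rest (level - 1) else [])
        ++ glueA fuel s level rest

theorem loopA_eq (fuel : Nat) (s level : Int) :
    ∀ (l acc : List Int),
      (l.foldl (fun (st : List Int × List Int) x =>
        let ary := (PySem.List.remove? st.1 x).getD st.1
        if level - 1 ≤ (ary.length : Int) then
          (ary, st.2 ++ recurseA fuel (s + x) ary (level - 1))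
        else (ary, st.2)) (l, acc)).2 = acc ++ glueA fuel s level l := by
  intro l
  induction l with
  | nil => intro acc; simp [glueA]
  | cons x rest ih =>
      intro acc
      simp only [List.foldl_cons, PySem.List.remove?_cons_self, Option.getD_some, glueA]
      split
      · rw [ih]; simp
      · rw [ih]; simp

theorem recurseA_one (fuel : Nat) (s : Int) (ls : List Int) :
    recurseA (fuel + 1) s ls 1 = ls.map (fun x => x + s) := by
  simp [recurseA]

theorem recurseA_ne_one (fuel : Nat) (s level : Int) (ls : List Int) (h : level ≠ 1) :
    recurseA (fuel + 1) s ls level = glueA fuel s level ls := by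
  simp only [recurseA, if_neg h]
  simpa using loopA_eq fuel s level ls []

theorem recurseA_nonpos : ∀ (fuel : Nat) (s level : Int) (ls : List Int), level ≤ 0 →
    recurseA fuel s ls level = [] := by
  intro fuel
  induction fuel with
  | zero => intro s level ls _; rfl
  | succ fuel ih =>
      intro s level ls h
      rw [recurseA_ne_one fuel s level ls (by omega)]
      induction ls with
      | nil => rfl
      | cons x rest ihl =>
          simp only [glueA, ihl, List.append_nil]
          split
          · exact ih _ _ _ (by omega)
          · rfl

theorem mem_recurseA : ∀ (fuel : Nat) (ls : List Int), ls.length < fuel →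
    ∀ (s level a : Int), 1 ≤ level →
    (a ∈ recurseA fuel s ls level ↔
      ∃ c : List Int, c.Sublist ls ∧ (c.length : Int) = level ∧ a = s + c.sum) := by
  intro fuel
  induction fuel with
  | zero => intro ls h; omega
  | succ fuel ih =>
      intro ls hlen s level a hlevel
      by_cases h1 : level = 1
      · subst h1
        rw [recurseA_one]
        simp only [List.mem_map]
        constructor
        · rintro ⟨x, hx, rfl⟩
          exact ⟨[x], List.singleton_sublist.mpr hx, by simp, by simp; omega⟩
        · rintro ⟨c, hc, hc1, rfl⟩
          have : ∃ x, c = [x] := List.length_eq_one_iff.mp (by omega)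
          rcases this with ⟨x, rfl⟩
          exact ⟨x, List.singleton_sublist.mp hc, by simp; omega⟩
      · have h2 : 2 ≤ level := by omega
        rw [recurseA_ne_one fuel s level ls h1]
        have main : ∀ l : List Int, l.length ≤ fuel →
            (a ∈ glueA fuel s level l ↔
              ∃ c : List Int, c.Sublist l ∧ (c.length : Int) = level ∧ a = s + c.sum) := by
          intro l
          induction l with
          | nil =>
              intro _
              simp only [glueA, List.not_mem_nil, false_iff]
              rintro ⟨c, hc, hc1, _⟩
              have := hc.length_le
              simp only [List.length_nil] at this
              omega
          | cons x rest ihl =>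
              intro hl
              simp only [glueA, List.mem_append]
              have branch : (a ∈ if level - 1 ≤ ((rest.length : Nat) : Int) then
                  recurseA fuel (s + x) rest (level - 1) else []) ↔
                  ∃ c' : List Int, c'.Sublist rest ∧ (c'.length : Int) = level - 1 ∧
                    a = (s + x) + c'.sum := by
                split
                · exact ih rest (by simp at hl ⊢; omega) (s + x) (level - 1) a (by omega)
                · rename_i hno
                  simp only [List.not_mem_nil, false_iff]
                  rintro ⟨c', hc', hc1, _⟩
                  have := hc'.length_le
                  omega
              rw [branch, ihl (by simp at hl ⊢; omega)]
              constructor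
              · rintro (⟨c', hs, hl1, rfl⟩ | ⟨c, hs, hl1, rfl⟩)
                · exact ⟨x :: c', List.sublist_cons_iff.mpr (Or.inr ⟨c', rfl, hs⟩),
                    by simp; omega, by simp; ring⟩
                · exact ⟨c, List.sublist_cons_iff.mpr (Or.inl hs), hl1, rfl⟩
              · rintro ⟨c, hs, hl1, rfl⟩
                rcases List.sublist_cons_iff.mp hs with hcr | ⟨r, rfl, hr⟩
                · exact Or.inr ⟨c, hcr, hl1, rfl⟩
                · exact Or.inl ⟨r, hr, by simp at hl1 ⊢; omega, by simp; ring⟩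
        exact main ls (by omega)

-- sublist decomposition at a snoc (used for B's left-to-right DP invariant)
theorem sublist_concat_iff (l l2 : List Int) (x : Int) :
    l.Sublist (l2 ++ [x]) ↔ l.Sublist l2 ∨ ∃ r, l = r ++ [x] ∧ r.Sublist l2 := by
  constructor
  · intro h
    rcases List.sublist_append_iff.mp h with ⟨u, v, rfl, hu, hv⟩
    rcases List.sublist_singleton.mp hv with rfl | rfl
    · exact Or.inl (by simpa using hu)
    · exact Or.inr ⟨u, rfl, hu⟩
  · rintro (h | ⟨r, rfl, hr⟩)
    · exact h.trans (List.sublist_append_left _ _)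
    · exact hr.append (List.Sublist.refl _)

-- B's DP invariant: after processing prefix p, dp has length m+1 and dp[j] is the set of sums of
-- j-element sublists of p
def InvB (m : Nat) (p : List Int) (dp : List (PySem.Set Int)) : Prop :=
  dp.length = m + 1 ∧
  ∀ j : Nat, j ≤ m → ∀ a : Int,
    (a ∈ dp.getD j [] ↔ ∃ c : List Int, c.Sublist p ∧ c.length = j ∧ a = c.sum)

theorem mem_bShift (x a : Int) (s : PySem.Set Int) :
    a ∈ bShift x s ↔ ∃ v ∈ s, a = v + x := by
  simp only [bShift, PySem.Set.mem_ofList, List.mem_map]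
  constructor
  · rintro ⟨v, hv, rfl⟩; exact ⟨v, hv, rfl⟩
  · rintro ⟨v, hv, rfl⟩; exact ⟨v, hv, rfl⟩

theorem InvB_step (m : Nat) (p : List Int) (dp : List (PySem.Set Int)) (x : Int)
    (h : InvB m p dp) : InvB m (p ++ [x]) (bStep x dp) := by
  obtain ⟨hlen, hmem⟩ := h
  rcases dp with _ | ⟨d0, rest⟩
  · simp at hlen
  have hrest : rest.length = m := by simpa using hlen
  have hzlen : (List.zipWith (fun cur sh => PySem.Set.union cur sh) rest
      ((d0 :: rest).dropLast.map (bShift x))).length = m := by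
    simp [hrest]
  constructor
  · rw [bStep]; simp [hrest]
  · intro j hj a
    match j with
    | 0 =>
        have h0 := hmem 0 (by omega) a
        simp only [List.getD_cons_zero] at h0 ⊢
        rw [bStep]
        simp only [List.getD_cons_zero]
        rw [h0]
        constructor
        · rintro ⟨c, hc, hc0, rfl⟩
          exact ⟨c, hc.trans (List.sublist_append_left _ _), hc0, rfl⟩
        · rintro ⟨c, hc, hc0, rfl⟩
          have : c = [] := List.length_eq_zero_iff.mp hc0
          subst this
          exact ⟨[], List.nil_sublist _, rfl, rfl⟩
    | j' + 1 =>
        rw [bStep]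
        simp only [List.getD_cons_succ]
        have hj' : j' < rest.length := by omega
        have hdrop : ((d0 :: rest).dropLast.map (bShift x)).length = m := by simp [hrest]
        have hget : (List.zipWith (fun cur sh => PySem.Set.union cur sh) rest
            ((d0 :: rest).dropLast.map (bShift x))).getD j' [] =
            PySem.Set.union (rest[j']'hj')
              (bShift x ((d0 :: rest).getD j' [])) := by
          rw [List.getD_eq_getElem _ _ (by rw [hzlen]; omega)]
          rw [List.getElem_zipWith]
          congr 1
          rw [List.getElem_map]
          congr 1
          rw [List.getElem_dropLast]
          rcases j' with _ | j''
          · simp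
          · simp only [List.getElem_cons_succ, List.getD_cons_succ]
            rw [List.getD_eq_getElem _ _ (by omega)]
        rw [hget]
        rw [PySem.Set.mem_union]
        have hA := hmem (j' + 1) (by omega) a
        simp only [List.getD_cons_succ] at hA
        rw [List.getD_eq_getElem _ _ hj'] at hA
        rw [hA]
        constructor
        · rintro (⟨c, hc, hcl, rfl⟩ | hsh)
          · exact ⟨c, hc.trans (List.sublist_append_left _ _), hcl, rfl⟩
          · rw [mem_bShift] at hsh
            obtain ⟨v, hv, rfl⟩ := hsh
            have hB := hmem j' (by omega) v
            -- (hB already in getD form)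
            obtain ⟨c', hc', hcl', rfl⟩ := hB.mp hv
            exact ⟨c' ++ [x], (sublist_concat_iff _ _ _).mpr (Or.inr ⟨c', rfl, hc'⟩),
              by simp [hcl'], by simp⟩
        · rintro ⟨c, hc, hcl, rfl⟩
          rcases (sublist_concat_iff _ _ _).mp hc with hcp | ⟨r, rfl, hr⟩
          · exact Or.inl ⟨c, hcp, hcl, rfl⟩
          · right
            rw [mem_bShift]
            have hB := hmem j' (by omega) r.sum
            -- (hB already in getD form)
            exact ⟨r.sum, hB.mpr ⟨r, hr, by simp at hcl; omega, rfl⟩, by simp⟩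

theorem InvB_foldl (m : Nat) :
    ∀ (ls p : List Int) (dp : List (PySem.Set Int)), InvB m p dp →
      InvB m (p ++ ls) (ls.foldl (fun dp x => bStep x dp) dp) := by
  intro ls
  induction ls with
  | nil => intro p dp h; simpa using h
  | cons x rest ih =>
      intro p dp h
      have := ih (p ++ [x]) (bStep x dp) (InvB_step m p dp x h)
      simpa using this

theorem InvB_init (m : Nat) :
    InvB m [] (PySem.Set.ofList [0] :: (PySem.List.pyRange 0 (m : Int) 1).map (fun _ => PySem.Set.empty)) := by
  constructor
  · simp [PySem.List.length_pyRange_one]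
  · intro j hj a
    match j with
    | 0 =>
        simp only [List.getD_cons_zero]
        constructor
        · intro h
          simp [PySem.Set.mem_ofList] at h
          exact ⟨[], List.nil_sublist _, rfl, by simp [h]⟩
        · rintro ⟨c, hc, hc0, rfl⟩
          have : c = [] := List.length_eq_zero_iff.mp hc0
          subst this
          simp [PySem.Set.mem_ofList]
    | j' + 1 =>
        simp only [List.getD_cons_succ]
        constructor
        · intro h
          exfalso
          have hlen : ((PySem.List.pyRange 0 (m : Int) 1).map
              (fun _ => (PySem.Set.empty : PySem.Set Int))).length = m := by
            simp [PySem.List.length_pyRange_one]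
          by_cases hj'' : j' < m
          · rw [List.getD_eq_getElem _ _ (by omega)] at h
            rw [List.getElem_map] at h
            simp [PySem.Set.empty] at h
          · rw [List.getD_eq_default _ _ (by omega)] at h
            simp at h
        · rintro ⟨c, hc, hcl, rfl⟩
          have := hc.length_le
          simp only [List.length_nil] at this
          omega

-- A's closing loop: running best with 'x > sum and x <= t' is the max over the filtered list
theorem foldA_eq (t : Int) :
    ∀ (l : List Int) (acc : Int), 0 ≤ acc →
      l.foldl (fun acc x => if acc < x ∧ x ≤ t then x else acc) acc =
        (l.filter (fun x => decide (0 < x ∧ x ≤ t))).foldl max acc := by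
  intro l
  induction l with
  | nil => intro acc _; rfl
  | cons x rest ih =>
      intro acc hacc
      by_cases hq : 0 < x ∧ x ≤ t
      · have h1 : (x :: rest).filter (fun x => decide (0 < x ∧ x ≤ t)) =
            x :: rest.filter (fun x => decide (0 < x ∧ x ≤ t)) := by simp [hq]
        rw [h1]
        simp only [List.foldl_cons]
        rw [show (if acc < x ∧ x ≤ t then x else acc) = max acc x from by split_ifs <;> omega]
        exact ih (max acc x) (by omega)
      · have h1 : (x :: rest).filter (fun x => decide (0 < x ∧ x ≤ t)) =
            rest.filter (fun x => decide (0 < x ∧ x ≤ t)) := by simp [hq]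
        rw [h1]
        simp only [List.foldl_cons]
        rw [show (if acc < x ∧ x ≤ t then x else acc) = acc from by split_ifs <;> omega]
        exact ih acc hacc

theorem le_foldl_max : ∀ (l : List Int) (a : Int), a ≤ l.foldl max a := by
  intro l
  induction l with
  | nil => intro a; simp
  | cons x rest ih =>
      intro a
      exact le_trans (le_max_left a x) (ih (max a x))

-- converting A's '0 means none' result into max? (all elements of l are positive)
theorem foldl_max_zero_eq_max? (l : List Int) (hpos : ∀ a ∈ l, 0 < a) :
    (if l.foldl max 0 = 0 then none else some (l.foldl max 0)) = l.max? := by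
  rcases l with _ | ⟨y, ys⟩
  · simp
  · have hy : 0 < y := hpos y (by simp)
    have h1 : (y :: ys).foldl max 0 = ys.foldl max y := by
      simp only [List.foldl_cons]
      congr 1
      omega
    have h2 : y ≤ ys.foldl max y := le_foldl_max ys y
    rw [h1]
    rw [if_neg (by omega)]
    simp [List.max?]

-- B's closing loop equals the option-valued running max over the filtered list
theorem foldB_eq (t : Int) :
    ∀ (l : List Int) (b : Option Int),
      l.foldl (fun best s =>
        match best with
        | none => if 0 < s ∧ s ≤ t then some s else none
        | some b => if 0 < s ∧ s ≤ t ∧ b < s then some s else some b) b =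
      (l.filter (fun x => decide (0 < x ∧ x ≤ t))).foldl
        (fun ob s => some (ob.elim s (fun m => max m s))) b := by
  intro l
  induction l with
  | nil => intro b; rfl
  | cons x rest ih =>
      intro b
      by_cases hq : 0 < x ∧ x ≤ t
      · have h1 : (x :: rest).filter (fun x => decide (0 < x ∧ x ≤ t)) =
            x :: rest.filter (fun x => decide (0 < x ∧ x ≤ t)) := by simp [hq]
        rw [h1]
        simp only [List.foldl_cons]
        have : (match b with
            | none => if 0 < x ∧ x ≤ t then some x else none
            | some bb => if 0 < x ∧ x ≤ t ∧ bb < x then some x else some bb) =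
            some (b.elim x (fun m => max m x)) := by
          rcases b with _ | bb
          · simp [hq]
          · simp only [Option.elim]
            split_ifs with h
            · congr 1; omega
            · congr 1
              rcases hq with ⟨hq1, hq2⟩
              omega
        rw [this, ih]
      · have h1 : (x :: rest).filter (fun x => decide (0 < x ∧ x ≤ t)) =
            rest.filter (fun x => decide (0 < x ∧ x ≤ t)) := by simp [hq]
        rw [h1]
        simp only [List.foldl_cons]
        have : (match b with
            | none => if 0 < x ∧ x ≤ t then some x else none
            | some bb => if 0 < x ∧ x ≤ t ∧ bb < x then some x else some bb) = b := by
          rcases b with _ | bb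
          · simp [hq]
          · simp only []
            rw [if_neg (by tauto)]
        rw [this, ih]

theorem foldl_omax_some (l : List Int) : ∀ (m : Int),
    l.foldl (fun ob s => some (ob.elim s (fun mm => max mm s))) (some m) =
      some (l.foldl max m) := by
  induction l with
  | nil => intro m; rfl
  | cons x rest ih => intro m; simp only [List.foldl_cons, Option.elim]; exact ih (max m x)

theorem foldl_omax_none (l : List Int) :
    l.foldl (fun ob s => some (ob.elim s (fun mm => max mm s))) none = l.max? := by
  rcases l with _ | ⟨y, ys⟩
  · rfl
  · rw [show List.foldl (fun ob s => some (ob.elim s (fun mm => max mm s))) none (y :: ys)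
        = List.foldl (fun ob s => some (ob.elim s (fun mm => max mm s))) (some y) ys from rfl]
    rw [foldl_omax_some]
    simp [List.max?]

theorem max?_isMax (l : List Int) (m : Int) (h : l.max? = some m) :
    m ∈ l ∧ ∀ x ∈ l, x ≤ m := by
  rcases l with _ | ⟨y, ys⟩
  · simp [List.max?] at h
  · simp only [List.max?] at h
    have hfold : ∀ (zs : List Int) (a : Int),
        (zs.foldl max a = a ∨ zs.foldl max a ∈ zs) ∧
        a ≤ zs.foldl max a ∧ ∀ x ∈ zs, x ≤ zs.foldl max a := by
      intro zs
      induction zs with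
      | nil => intro a; simp
      | cons z zs ih =>
          intro a
          obtain ⟨h1, h2, h3⟩ := ih (max a z)
          refine ⟨?_, ?_, ?_⟩
          · simp only [List.foldl_cons]
            rcases h1 with h1 | h1
            · rw [h1]
              rcases max_choice a z with hm | hm
              · exact Or.inl hm
              · exact Or.inr (by simp [hm])
            · exact Or.inr (by simp [h1])
          · simp only [List.foldl_cons]
            exact le_trans (le_max_left a z) h2
          · intro x hx
            simp only [List.foldl_cons]
            rcases List.mem_cons.mp hx with rfl | hx
            · exact le_trans (le_max_right a x) h2
            · exact h3 x hx
    obtain ⟨h1, h2, h3⟩ := hfold ys y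
    injection h with h
    subst h
    constructor
    · rcases h1 with h1 | h1
      · rw [h1]; simp
      · exact List.mem_cons_of_mem _ h1
    · intro x hx
      rcases List.mem_cons.mp hx with rfl | hx
      · exact h2
      · exact h3 x hx

theorem max?_congr (l1 l2 : List Int) (h : ∀ a, a ∈ l1 ↔ a ∈ l2) : l1.max? = l2.max? := by
  cases h1 : l1.max? with
  | none =>
      have : l1 = [] := by
        rcases l1 with _ | ⟨y, ys⟩
        · rfl
        · simp [List.max?] at h1
      subst this
      cases h2 : l2.max? with
      | none => rfl
      | some m2 =>
          obtain ⟨hm2, _⟩ := max?_isMax l2 m2 h2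
          exact absurd ((h m2).mpr hm2) (by simp)
  | some m1 =>
      obtain ⟨hm1, hmax1⟩ := max?_isMax l1 m1 h1
      cases h2 : l2.max? with
      | none =>
          have : l2 = [] := by
            rcases l2 with _ | ⟨y, ys⟩
            · rfl
            · simp [List.max?] at h2
          subst this
          exact absurd ((h m1).mp hm1) (by simp)
      | some m2 =>
          obtain ⟨hm2, hmax2⟩ := max?_isMax l2 m2 h2
          have hle1 : m1 ≤ m2 := hmax2 m1 ((h m1).mp hm1)
          have hle2 : m2 ≤ m1 := hmax1 m2 ((h m2).mpr hm2)
          congr 1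
          omega

theorem bStep_singleton (x : Int) (d : PySem.Set Int) : bStep x [d] = [d] := by
  simp [bStep]

theorem foldl_bStep_singleton (d : PySem.Set Int) :
    ∀ ls : List Int, ls.foldl (fun dp x => bStep x dp) [d] = [d] := by
  intro ls
  induction ls with
  | nil => rfl
  | cons x rest ih => simp only [List.foldl_cons, bStep_singleton]; exact ih

-- ===== VERDICT (by name: the statement is the Claim_ definition above) =====
theorem choose_best_sum2_spec : Claim_equal_choose_best_sum2 := by
  intro t k ls _
  unfold Spec_choose_best_sum2 choose_best_sum2 choose_best_sum2_alt
  by_cases hk0 : k < 0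
  · rw [if_pos (Or.inl hk0)]
    rw [if_neg (by omega)]
    rw [recurseA_nonpos _ 0 k ls (by omega)]
    simp
  · by_cases hlt : (ls.length : Int) < k
    · rw [if_pos hlt, if_pos (Or.inr hlt)]
    · rw [if_neg hlt,
        if_neg (show ¬(k < 0 ∨ (ls.length : Int) < k) from by tauto)]
      dsimp only
      by_cases hk1 : k = 0
      · subst hk1
        rw [recurseA_nonpos _ 0 0 ls (by omega)]
        rw [show PySem.List.pyRange 0 0 1 = [] from rfl]
        simp only [List.map_nil, foldl_bStep_singleton]
        rw [show (PySem.List.pyGet? [PySem.Set.ofList [(0:Int)]] (0:Int)).getD PySem.Set.empty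
            = PySem.Set.ofList [(0:Int)] from rfl]
        rw [show (PySem.Set.ofList [(0:Int)] : List Int) = [0] from rfl]
        simp
      · -- main case: 1 ≤ k ≤ ls.length
        have hk : 1 ≤ k := by omega
        -- A's totals
        have hA := mem_recurseA (ls.length + 1) ls (by omega) 0 k
        -- B's dp
        have hInv := InvB_foldl k.toNat ls []
          (PySem.Set.ofList [0] :: (PySem.List.pyRange 0 k 1).map (fun _ => PySem.Set.empty))
          (by have := InvB_init k.toNat
              rwa [Int.toNat_of_nonneg (by omega)] at this)
        simp only [List.nil_append] at hInv
        obtain ⟨hdplen, hdpmem⟩ := hInv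
        set dp := ls.foldl (fun dp x => bStep x dp)
          (PySem.Set.ofList [0] :: (PySem.List.pyRange 0 k 1).map (fun _ => PySem.Set.empty)) with hdp
        have hkrange : k.toNat < dp.length := by omega
        have hdpk : (PySem.List.pyGet? dp k).getD PySem.Set.empty = dp.getD k.toNat [] := by
          have hk' : k = ((k.toNat : Nat) : Int) := by omega
          rw [hk', Int.toNat_natCast, PySem.List.pyGet?_natCast]
          rw [List.getElem?_eq_getElem hkrange]
          rw [List.getD_eq_getElem _ _ hkrange]
          rfl
        rw [hdpk]
        -- same membership in the two candidate lists
        have hmemeq : ∀ a : Int, a ∈ recurseA (ls.length + 1) 0 ls k ↔ a ∈ dp.getD k.toNat [] := by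
          intro a
          rw [hA a hk, hdpmem k.toNat (by omega) a]
          constructor
          · rintro ⟨c, hc, hcl, rfl⟩
            exact ⟨c, hc, by omega, by omega⟩
          · rintro ⟨c, hc, hcl, rfl⟩
            exact ⟨c, hc, by omega, by omega⟩
        -- rewrite both closing loops as max? of the filtered lists
        rw [foldA_eq t _ 0 le_rfl, foldB_eq t]
        rw [foldl_omax_none]
        rw [foldl_max_zero_eq_max? _ (by
          intro a ha
          rw [List.mem_filter] at ha
          have := ha.2
          simp at this
          omega)]
        apply max?_congr
        intro a
        rw [List.mem_filter, List.mem_filter]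
        rw [hmemeq a]
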